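-- pv_equiv track=rewrite | github.com/bobxiong88/scrapeforces | subs/1527A.py | get
-- ===== SOURCE A (Python) =====
-- def get (left, right):
--
--     res = 0
--
--     while (left<right):
--
--         left >>= 1
--
--         right >>= 1
--
--         res +=1
--
--     res = right << res;
--
--     return res
-- ===== SOURCE B (Python) =====
-- def get(left, right):
--     # Closed form: no loop. If left >= right, A's loop never runs and returns right.
--     # Otherwise (same-sign left < right within the terminating domain) the loop runs
--     # exactly bit_length(left ^ right) times, clearing that many low bits of right.
--     if left >= right:
--         return right
--     s = (left ^ right).bit_length()
--     return (right >> s) << s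
-- ===== Notes on version B (the rewrite author's own statement) =====
-- stated objective: simpler
-- what changed: Replaces A's shift-both-until-left>=right while loop by a loop-free closed form: for left < right the loop runs exactly (left ^ right).bit_length() times, so B returns (right >> s) << s with s that bit length, and returns right unchanged when left >= right.
import Mathlib
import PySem

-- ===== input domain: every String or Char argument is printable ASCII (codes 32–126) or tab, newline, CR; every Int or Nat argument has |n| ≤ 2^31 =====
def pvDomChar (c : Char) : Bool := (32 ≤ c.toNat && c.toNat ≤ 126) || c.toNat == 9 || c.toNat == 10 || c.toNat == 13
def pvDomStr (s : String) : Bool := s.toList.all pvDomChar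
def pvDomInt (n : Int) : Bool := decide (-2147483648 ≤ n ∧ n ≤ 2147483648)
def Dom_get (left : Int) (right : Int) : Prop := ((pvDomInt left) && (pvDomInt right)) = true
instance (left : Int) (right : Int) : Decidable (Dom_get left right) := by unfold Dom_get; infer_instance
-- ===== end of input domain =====

-- B replaces A's shift-until-equal loop by a closed form via xor and bit_length (simpler, no loop).

-- ===== PORT A =====
-- A's while loop, step for step; the fuel only makes it total (64 exceeds the
-- iterations any input in Dom_get ∩ Pre_get needs; A diverges outside Pre_get).
def getLoop (fuel : Nat) (left : Int) (right : Int) (res : Nat) : Int × Nat :=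
  match fuel with
  | 0 => (right, res)
  | f + 1 =>
    if left < right then getLoop f (left >>> 1) (right >>> 1) (res + 1)
    else (right, res)

def get (left : Int) (right : Int) : Int :=
  let p := getLoop 64 left right 0
  p.1 <<< p.2          -- res = right << res; return res

-- ===== PORT B =====
def get_alt (left : Int) (right : Int) : Int :=
  if left ≥ right then right
  else
    let s := PySem.Int.bitLength (PySem.Int.bxor left right)  -- (left ^ right).bit_length()
    (right >>> s) <<< s

-- ===== PRECONDITION & SPEC =====
-- Pre_ excludes exactly the inputs with left < 0 ≤ right, on which A's while loop
-- never terminates (left stays negative, right stays nonnegative under >>); A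
-- returns on every other input.
def Pre_get (left : Int) (right : Int) : Prop := ¬ (left < 0 ∧ 0 ≤ right)
instance (left : Int) (right : Int) : Decidable (Pre_get left right) := by unfold Pre_get; infer_instance
def pvWitness_get : Int × Int := (5, 12)

def Spec_get (left : Int) (right : Int) (out : Int) : Prop := out = get_alt left right
instance (left : Int) (right : Int) (out : Int) : Decidable (Spec_get left right out) := by unfold Spec_get; infer_instance

-- ===== CLAIM (what is proved, stated in full; the proofs are below) =====
def Claim_equal_get : Prop := ∀ (left : Int) (right : Int), Dom_get left right → Pre_get left right → Spec_get left right (get left right)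

-- ===== LEMMAS AND PROOFS =====

-- Nat model of A's loop: shift both components while fst < snd, counting.
def loopN (fuel : Nat) (a : Nat) (b : Nat) (res : Nat) : Nat × Nat × Nat :=
  match fuel with
  | 0 => (a, b, res)
  | f + 1 =>
    if a < b then loopN f (a >>> 1) (b >>> 1) (res + 1)
    else (a, b, res)

theorem size_shiftRight_one (x : Nat) (hx : x ≠ 0) :
    Nat.size (x >>> 1) = Nat.size x - 1 := by
  have h1 : 0 < Nat.size x := by
    have : Nat.size x ≠ 0 := fun h => hx (Nat.size_eq_zero.mp h)
    omega
  apply Nat.le_antisymm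
  · rw [Nat.size_le, Nat.shiftRight_one]
    have h0 : x < 2 ^ Nat.size x := Nat.size_le.mp (le_refl (Nat.size x))
    have h2 : 2 ^ Nat.size x = 2 * 2 ^ (Nat.size x - 1) := by
      rw [← pow_succ']; congr 1; omega
    omega
  · rcases Nat.eq_or_lt_of_le h1 with h | h
    · omega
    · have h2 : 2 ^ (Nat.size x - 1) ≤ x := Nat.lt_size.mp (by omega)
      have h3 : 2 ^ (Nat.size x - 2) ≤ x >>> 1 := by
        rw [Nat.shiftRight_one]
        have : 2 ^ (Nat.size x - 1) = 2 * 2 ^ (Nat.size x - 2) := by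
          rw [← pow_succ']; congr 1; omega
        omega
      have := Nat.lt_size.mpr h3
      omega

theorem xor_shiftRight_one (a b : Nat) :
    (a >>> 1) ^^^ (b >>> 1) = (a ^^^ b) >>> 1 := by
  apply Nat.eq_of_testBit_eq
  intro i
  simp [Nat.testBit_xor, Nat.testBit_shiftRight]

-- Closed form of the Nat loop: it runs exactly size (a ^^^ b) times.
theorem loopN_eq (fuel : Nat) : ∀ (a b res : Nat), a ≤ b →
    Nat.size (a ^^^ b) ≤ fuel →
    loopN fuel a b res =
      (a >>> Nat.size (a ^^^ b), b >>> Nat.size (a ^^^ b), res + Nat.size (a ^^^ b)) := by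
  induction fuel with
  | zero =>
    intro a b res _ hs
    have h0 : a ^^^ b = 0 := Nat.size_eq_zero.mp (Nat.le_zero.mp hs)
    have hab : a = b := Nat.xor_eq_zero_iff.mp h0
    simp [loopN, h0]
  | succ f ih =>
    intro a b res hab hs
    by_cases h : a < b
    · have hne : a ^^^ b ≠ 0 := fun h0 => absurd (Nat.xor_eq_zero_iff.mp h0) (Nat.ne_of_lt h)
      have hspos : 0 < Nat.size (a ^^^ b) := by
        have : Nat.size (a ^^^ b) ≠ 0 := fun h0 => hne (Nat.size_eq_zero.mp h0)
        omega
      have hmono : a >>> 1 ≤ b >>> 1 := by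
        rw [Nat.shiftRight_one, Nat.shiftRight_one]
        exact Nat.div_le_div_right hab
      have hsize : Nat.size ((a >>> 1) ^^^ (b >>> 1)) = Nat.size (a ^^^ b) - 1 := by
        rw [xor_shiftRight_one]; exact size_shiftRight_one _ hne
      have hrec := ih (a >>> 1) (b >>> 1) (res + 1) hmono (by omega)
      simp only [loopN, if_pos h, hrec, hsize]
      rw [← Nat.shiftRight_add, ← Nat.shiftRight_add]
      have he : 1 + (Nat.size (a ^^^ b) - 1) = Nat.size (a ^^^ b) := by omega
      rw [he]
      simp only [Prod.mk.injEq, true_and]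
      omega
    · have hab' : a = b := Nat.le_antisymm hab (Nat.not_lt.mp h)
      have h0 : a ^^^ b = 0 := Nat.xor_eq_zero_iff.mpr hab'
      simp [loopN, h, h0]

-- Bridges: A's Int loop is the Nat loop, in each sign case.
theorem getLoop_ofNat (fuel : Nat) : ∀ (a b res : Nat),
    getLoop fuel (Int.ofNat a) (Int.ofNat b) res =
      (Int.ofNat (loopN fuel a b res).2.1, (loopN fuel a b res).2.2) := by
  induction fuel with
  | zero => intro a b res; simp [getLoop, loopN]
  | succ f ih =>
    intro a b res
    by_cases h : a < b
    · have hI : (Int.ofNat a) < (Int.ofNat b) := Int.ofNat_lt.mpr h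
      simp only [getLoop, loopN, if_pos h, if_pos hI]
      have ha : (Int.ofNat a) >>> 1 = Int.ofNat (a >>> 1) := rfl
      have hb : (Int.ofNat b) >>> 1 = Int.ofNat (b >>> 1) := rfl
      rw [ha, hb, ih]
    · have hI : ¬ (Int.ofNat a) < (Int.ofNat b) := fun hc => h (Int.ofNat_lt.mp hc)
      simp [getLoop, loopN, h]

theorem getLoop_negSucc (fuel : Nat) : ∀ (m n res : Nat),
    getLoop fuel (Int.negSucc m) (Int.negSucc n) res =
      (Int.negSucc (loopN fuel n m res).1, (loopN fuel n m res).2.2) := by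
  induction fuel with
  | zero => intro m n res; simp [getLoop, loopN]
  | succ f ih =>
    intro m n res
    by_cases h : n < m
    · have hI : (Int.negSucc m) < (Int.negSucc n) := by omega
      simp only [getLoop, loopN, if_pos h, if_pos hI]
      have ha : (Int.negSucc m) >>> 1 = Int.negSucc (m >>> 1) := rfl
      have hb : (Int.negSucc n) >>> 1 = Int.negSucc (n >>> 1) := rfl
      rw [ha, hb, ih]
    · have hI : ¬ (Int.negSucc m) < (Int.negSucc n) := by omega
      simp [getLoop, loopN, h, hI]

-- bit_length of a nonnegative int is Nat.size.
theorem bitLength_eq_size (x : Nat) : PySem.Int.bitLength (Int.ofNat x) = Nat.size x := by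
  rcases eq_or_ne x 0 with h | h
  · subst h; simp [PySem.Int.bitLength_zero]
  · have hx : (Int.ofNat x : Int) ≠ 0 := by simpa using h
    have habs : (Int.ofNat x : Int).natAbs = x := rfl
    have h1 : x < 2 ^ PySem.Int.bitLength (Int.ofNat x) := by
      have := PySem.Int.lt_two_pow_bitLength (Int.ofNat x)
      rwa [habs] at this
    have h2 : 2 ^ (PySem.Int.bitLength (Int.ofNat x) - 1) ≤ x := by
      have := PySem.Int.two_pow_bitLength_le (Int.ofNat x) hx
      rwa [habs] at this
    apply Nat.le_antisymm
    · have hpos : 0 < PySem.Int.bitLength (Int.ofNat x) := by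
        by_contra hc
        have : PySem.Int.bitLength (Int.ofNat x) = 0 := by omega
        rw [this] at h1; simp at h1; exact h h1
      have := Nat.lt_size.mpr h2
      omega
    · exact Nat.size_le.mpr h1

theorem bxor_negSucc (m n : Nat) :
    PySem.Int.bxor (Int.negSucc m) (Int.negSucc n) = Int.ofNat (m ^^^ n) := by
  have hm : ¬ (0 : Int) ≤ Int.negSucc m := by simp [Int.negSucc_eq]; omega
  have hn : ¬ (0 : Int) ≤ Int.negSucc n := by simp [Int.negSucc_eq]; omega
  have h1 : (-(Int.negSucc m) - 1).toNat = m := by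
    simp [Int.negSucc_eq]
  have h2 : (-(Int.negSucc n) - 1).toNat = n := by
    simp [Int.negSucc_eq]
  simp [PySem.Int.bxor, hm, hn]

theorem bxor_ofNat (m n : Nat) :
    PySem.Int.bxor (Int.ofNat m) (Int.ofNat n) = Int.ofNat (m ^^^ n) := by
  simp [PySem.Int.bxor]

-- Both sides when the loop never runs.
theorem get_of_not_lt (left right : Int) (h : ¬ left < right) :
    get left right = right := by
  unfold _root_.get
  simp [getLoop, h, Int.shiftLeft_zero]

-- size bound inside Dom: both operands below 2^32.
theorem size_xor_le_64 (a b : Nat) (ha : a < 2 ^ 32) (hb : b < 2 ^ 32) :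
    Nat.size (a ^^^ b) ≤ 64 := by
  have h := Nat.xor_lt_two_pow ha hb
  have : Nat.size (a ^^^ b) ≤ 32 := Nat.size_le.mpr h
  omega

-- ===== VERDICT (by name: the statement is the Claim_ definition above) =====
set_option maxRecDepth 4096 in
theorem get_spec : Claim_equal_get := by
  intro left right hdom hpre
  have hdom' : left.natAbs ≤ 2 ^ 31 ∧ right.natAbs ≤ 2 ^ 31 := by
    unfold Dom_get pvDomInt at hdom
    simp only [Bool.and_eq_true, decide_eq_true_eq] at hdom
    omega
  unfold Spec_get
  by_cases hlt : left < right
  · -- the loop runs; split on the (same-sign) representations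
    have hge : ¬ left ≥ right := by omega
    rcases left with a | m <;> rcases right with b | n
    · -- both nonnegative
      have hab : a < b := Int.ofNat_lt.mp hlt
      have ha' : a ≤ 2 ^ 31 := by simpa using hdom'.1
      have hb' : b ≤ 2 ^ 31 := by simpa using hdom'.2
      have hs64 : Nat.size (a ^^^ b) ≤ 64 :=
        size_xor_le_64 a b (by omega) (by omega)
      unfold _root_.get get_alt
      rw [if_neg hge]
      rw [getLoop_ofNat, loopN_eq 64 a b 0 (Nat.le_of_lt hab) hs64]
      rw [bxor_ofNat, bitLength_eq_size]
      rw [Nat.zero_add]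
      rfl
    · -- nonnegative < negative: impossible
      exact absurd hlt (by simp [Int.negSucc_eq]; omega)
    · -- negative left, nonnegative right: excluded by Pre_get (A diverges)
      refine absurd hpre ?_
      unfold Pre_get
      simp only [not_not]
      exact ⟨by omega, Int.natCast_nonneg b⟩
    · -- both negative
      have hnm : n < m := by omega
      have hs64 : Nat.size (n ^^^ m) ≤ 64 :=
        size_xor_le_64 n m (by simp at hdom'; omega) (by simp at hdom'; omega)
      unfold _root_.get get_alt
      rw [if_neg hge]
      rw [getLoop_negSucc, loopN_eq 64 n m 0 (Nat.le_of_lt hnm) hs64]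
      rw [bxor_negSucc, bitLength_eq_size]
      rw [Nat.xor_comm m n]
      rw [Nat.zero_add]
      rfl
  · have hge : left ≥ right := by omega
    rw [get_of_not_lt left right hlt]
    unfold get_alt
    rw [if_pos hge]
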